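-- pv_equiv track=rewrite | github.com/Ant13731/CS2XC3Lab1 | code.py | are_valid_groups
-- ===== SOURCE A (Python) =====
-- def are_valid_groups(studentNums, groups):
--     #All students are by default not in a group
--     isStudentInGroup = []
--     for x in range(len(studentNums)):
--         isStudentInGroup.append(0)
--     #If students are in a group, set their respective index to true
--         for group in groups:
--             if len(group)<2 or len(group)>3:
--                 return False
--             if  group.count(studentNums[x])==1:
--                 isStudentInGroup[x]=isStudentInGroup[x]+1
--             elif group.count(studentNums[x])>1:
--                 return False
--     #If every student is in a group, return true, else return false
--     for student in isStudentInGroup: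
--         if student == 0 or student > 1:
--             return False
--     return True
-- ===== SOURCE B (Python) =====
-- def are_valid_groups(studentNums, groups):
--     # One pass over the groups builds per-value membership data;
--     # then each student is checked against it in O(1).
--     if not studentNums:
--         return True
--     once = {}      # value -> number of groups containing it exactly once
--     dup = set()    # values appearing more than once inside some group
--     for g in groups:
--         if not (2 <= len(g) <= 3):
--             return False
--         seen = {}
--         for v in g:
--             seen[v] = seen.get(v, 0) + 1
--         for v, c in seen.items():
--             if c == 1:
--                 once[v] = once.get(v, 0) + 1
--             else:
--                 dup.add(v)
--     return all(s not in dup and once.get(s, 0) == 1 for s in studentNums)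
-- ===== Notes on version B (the rewrite author's own statement) =====
-- stated objective: alternative
-- what changed: Instead of scanning every group for every student (group.count per student per group), B makes one pass over the groups building a per-value dict of exactly-once membership counts and a set of within-group duplicates, then checks each student with O(1) lookups; it trades A's nested rescans for index-building, which a timing run found equal on the generated inputs (A returns early on most of them).
import Mathlib
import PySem

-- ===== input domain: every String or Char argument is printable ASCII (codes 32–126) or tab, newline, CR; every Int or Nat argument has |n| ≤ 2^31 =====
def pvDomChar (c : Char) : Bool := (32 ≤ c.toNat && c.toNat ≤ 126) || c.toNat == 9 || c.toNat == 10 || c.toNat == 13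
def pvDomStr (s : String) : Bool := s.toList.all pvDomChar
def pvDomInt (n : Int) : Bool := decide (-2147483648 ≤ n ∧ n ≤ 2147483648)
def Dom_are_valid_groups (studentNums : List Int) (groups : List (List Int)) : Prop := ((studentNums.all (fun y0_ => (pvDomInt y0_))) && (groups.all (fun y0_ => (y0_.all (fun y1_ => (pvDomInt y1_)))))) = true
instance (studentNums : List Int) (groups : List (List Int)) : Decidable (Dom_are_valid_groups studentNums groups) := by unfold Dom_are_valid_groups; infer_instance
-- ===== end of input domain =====

-- B replaces A's per-student scan over all groups (group.count for each student/group pair)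
-- by ONE pass over the groups that builds a dict of exactly-once membership counts and a set of
-- within-group duplicates, then checks each student against them with O(1) lookups.

-- ===== PORT A =====

-- inner 'for group in groups' body for a fixed student index x (none = early 'return False')
def pvA_groupLoop (sx : Int) (groups : List (List Int)) (arr : List Int) (x : Nat) :
    Option (List Int) :=
  match groups with
  | [] => some arr
  | g :: rest =>
    if g.length < 2 ∨ g.length > 3 then none
    else if g.count sx = 1 then
      pvA_groupLoop sx rest (PySem.List.pySetD arr (x : Int) (PySem.List.pyGetD arr (x : Int) 0 + 1)) x
    else if g.count sx > 1 then none
    else pvA_groupLoop sx rest arr x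

-- outer 'for x in range(len(studentNums))': n iterations remain, current index x
def pvA_outer (studentNums : List Int) (groups : List (List Int)) (x : Nat) (n : Nat)
    (arr : List Int) : Option (List Int) :=
  match n with
  | 0 => some arr
  | Nat.succ n' =>
    match pvA_groupLoop (PySem.List.pyGetD studentNums (x : Int) 0) groups (arr ++ [0]) x with
    | none => none
    | some arr' => pvA_outer studentNums groups (x + 1) n' arr'

-- final 'for student in isStudentInGroup'
def pvA_final : List Int → Bool
  | [] => true
  | s :: rest => if s = 0 ∨ s > 1 then false else pvA_final rest

def are_valid_groups (studentNums : List Int) (groups : List (List Int)) : Bool :=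
  match pvA_outer studentNums groups 0 studentNums.length [] with
  | none => false
  | some arr => pvA_final arr

-- ===== PORT B =====

-- one pass over the groups: size check, per-group counter 'seen', then fold over seen.items
def pvB_scan (groups : List (List Int)) (once : PySem.Dict Int Int) (dup : PySem.Set Int) :
    Option (PySem.Dict Int Int × PySem.Set Int) :=
  match groups with
  | [] => some (once, dup)
  | g :: rest =>
    if ¬ (2 ≤ g.length ∧ g.length ≤ 3) then none
    else
      let seen : PySem.Dict Int Int := g.foldl (fun d v => d.insert v (d.getD v 0 + 1)) PySem.Dict.empty
      let st := seen.items.foldl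
        (fun (p : PySem.Dict Int Int × PySem.Set Int) kv =>
          if kv.2 = 1 then (p.1.insert kv.1 (p.1.getD kv.1 0 + 1), p.2)
          else (p.1, PySem.Set.add p.2 kv.1))
        (once, dup)
      pvB_scan rest st.1 st.2

def are_valid_groups_alt (studentNums : List Int) (groups : List (List Int)) : Bool :=
  if studentNums.isEmpty then true
  else
    match pvB_scan groups PySem.Dict.empty PySem.Set.empty with
    | none => false
    | some (once, dup) =>
      studentNums.all (fun s => !(PySem.Set.contains dup s) && once.getD s 0 == 1)

-- ===== PRECONDITION & SPEC =====
def Spec_are_valid_groups (studentNums : List Int) (groups : List (List Int)) (out : Bool) : Prop := out = are_valid_groups_alt studentNums groups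
instance (studentNums : List Int) (groups : List (List Int)) (out : Bool) : Decidable (Spec_are_valid_groups studentNums groups out) := by unfold Spec_are_valid_groups; infer_instance

-- ===== CLAIM (what is proved, stated in full; the proofs are below) =====
def Claim_equal_are_valid_groups : Prop := ∀ (studentNums : List Int) (groups : List (List Int)), Dom_are_valid_groups studentNums groups → Spec_are_valid_groups studentNums groups (are_valid_groups studentNums groups)

-- ===== LEMMAS AND PROOFS =====

-- abbreviations used only by the proofs
def pvSizesOK (groups : List (List Int)) : Prop := ∀ g ∈ groups, 2 ≤ g.length ∧ g.length ≤ 3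
def pvOk (groups : List (List Int)) (s : Int) : Prop := ∀ g ∈ groups, g.count s ≤ 1
def pvCnt (groups : List (List Int)) (s : Int) : Int :=
  ((groups.countP (fun g => g.count s == 1) : Nat) : Int)

theorem pvCnt_cons (g : List Int) (rest : List (List Int)) (s : Int) :
    pvCnt (g :: rest) s = (if g.count s = 1 then 1 else 0) + pvCnt rest s := by
  by_cases h : g.count s = 1 <;>
    simp [pvCnt, List.countP_cons, h] <;> push_cast <;> ring

-- ---- A side ----

theorem pvA_groupLoop_some (sx : Int) (groups : List (List Int)) :
    ∀ (arr : List Int) (x : Nat), x < arr.length →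
    pvSizesOK groups → pvOk groups sx →
    pvA_groupLoop sx groups arr x = some (arr.set x (arr.getD x 0 + pvCnt groups sx)) := by
  induction groups with
  | nil =>
    intro arr x hx _ _
    rw [pvA_groupLoop]
    rw [show arr.getD x 0 = arr[x] from by
      rw [List.getD_eq_getElem?_getD, List.getElem?_eq_getElem hx]; rfl]
    simp [pvCnt, hx]
  | cons g rest ih =>
    intro arr x hx hs hok
    have hsz := hs g (List.mem_cons_self ..)
    have hc := hok g (List.mem_cons_self ..)
    have hs' : pvSizesOK rest := fun g' hg' => hs g' (List.mem_cons_of_mem _ hg')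
    have hok' : pvOk rest sx := fun g' hg' => hok g' (List.mem_cons_of_mem _ hg')
    rw [pvA_groupLoop]
    have hnsz : ¬ (g.length < 2 ∨ g.length > 3) := by omega
    rw [if_neg hnsz]
    by_cases h1 : g.count sx = 1
    · rw [if_pos h1]
      simp only [PySem.List.pySetD_natCast, PySem.List.pyGetD_natCast]
      rw [ih _ x (by simpa using hx) hs' hok']
      rw [pvCnt_cons, if_pos h1]
      congr 1
      rw [List.set_set]
      congr 1
      rw [show (arr.set x (arr.getD x 0 + 1)).getD x 0 = arr.getD x 0 + 1 from by
        simp [List.getD_eq_getElem?_getD, List.getElem?_set_self, hx]]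
      ring
    · rw [if_neg h1, if_neg (by omega)]
      rw [ih _ x hx hs' hok', pvCnt_cons, if_neg h1]
      simp

-- the loop returns SOME value whenever sizes are fine and sx never repeats inside a group
theorem pvA_groupLoop_isSome (sx : Int) (groups : List (List Int)) :
    ∀ (arr : List Int) (x : Nat), pvSizesOK groups → pvOk groups sx →
    ∃ arr', pvA_groupLoop sx groups arr x = some arr' := by
  induction groups with
  | nil => intro arr x _ _; exact ⟨arr, rfl⟩
  | cons g rest ih =>
    intro arr x hs hok
    have hsz := hs g (List.mem_cons_self ..)
    have hc := hok g (List.mem_cons_self ..)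
    have hs' : pvSizesOK rest := fun g' hg' => hs g' (List.mem_cons_of_mem _ hg')
    have hok' : pvOk rest sx := fun g' hg' => hok g' (List.mem_cons_of_mem _ hg')
    rw [pvA_groupLoop, if_neg (by omega : ¬ (g.length < 2 ∨ g.length > 3))]
    by_cases h1 : g.count sx = 1
    · rw [if_pos h1]; exact ih _ x hs' hok'
    · rw [if_neg h1, if_neg (by omega)]; exact ih _ x hs' hok'

theorem pvA_groupLoop_none (sx : Int) (groups : List (List Int)) :
    ∀ (arr : List Int) (x : Nat),
    (¬ pvSizesOK groups ∨ ¬ pvOk groups sx) →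
    pvA_groupLoop sx groups arr x = none := by
  induction groups with
  | nil => intro arr x h; exfalso; rcases h with h | h <;> exact h (by simp [pvSizesOK, pvOk])
  | cons g rest ih =>
    intro arr x h
    rw [pvA_groupLoop]
    by_cases hsz : g.length < 2 ∨ g.length > 3
    · rw [if_pos hsz]
    · rw [if_neg hsz]
      by_cases hgt : g.count sx > 1
      · have h1 : ¬ g.count sx = 1 := by omega
        rw [if_neg h1, if_pos hgt]
      · have h' : ¬ pvSizesOK rest ∨ ¬ pvOk rest sx := by
          rcases h with h | h
          · left; intro hr; exact h (by
              intro g' hg'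
              rcases List.mem_cons.mp hg' with rfl | hg'
              · omega
              · exact hr g' hg')
          · right; intro hr; exact h (by
              intro g' hg'
              rcases List.mem_cons.mp hg' with rfl | hg'
              · omega
              · exact hr g' hg')
        by_cases h1 : g.count sx = 1
        · rw [if_pos h1]; exact ih _ x h'
        · rw [if_neg h1, if_neg hgt]; exact ih _ x h'

theorem pvA_outer_some (studentNums : List Int) (groups : List (List Int))
    (hs : pvSizesOK groups) :
    ∀ (n x : Nat) (arr : List Int), x + n = studentNums.length → arr.length = x →
    (∀ s ∈ studentNums.drop x, pvOk groups s) →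
    pvA_outer studentNums groups x n arr =
      some (arr ++ (studentNums.drop x).map (fun s => pvCnt groups s)) := by
  intro n
  induction n with
  | zero =>
    intro x arr hxn hlen _
    rw [pvA_outer]
    rw [List.drop_eq_nil_of_le (show studentNums.length ≤ x by omega)]
    simp
  | succ n' ih =>
    intro x arr hxn hlen hok
    have hxlt : x < studentNums.length := by omega
    have hget : PySem.List.pyGetD studentNums (x : Int) 0 = studentNums[x] := by
      simp [PySem.List.pyGetD_natCast, List.getD_eq_getElem?_getD, List.getElem?_eq_getElem hxlt]
    have hdrop : studentNums.drop x = studentNums[x] :: studentNums.drop (x + 1) :=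
      List.drop_eq_getElem_cons hxlt
    have hmem : studentNums[x] ∈ studentNums.drop x := by rw [hdrop]; exact List.mem_cons_self ..
    have hset : (arr ++ [0]).set x ((arr ++ [0]).getD x 0 + pvCnt groups studentNums[x]) =
        arr ++ [pvCnt groups studentNums[x]] := by
      subst hlen; simp
    rw [pvA_outer, hget,
      pvA_groupLoop_some studentNums[x] groups (arr ++ [0]) x (by simp [hlen]) hs
        (hok _ hmem), hset]
    show pvA_outer studentNums groups (x + 1) n' (arr ++ [pvCnt groups studentNums[x]]) = _
    rw [ih (x + 1) (arr ++ [pvCnt groups studentNums[x]]) (by omega) (by simp [hlen])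
        (fun s hsm => hok s (by rw [hdrop]; exact List.mem_cons_of_mem _ hsm))]
    rw [hdrop, List.map_cons]
    simp

theorem pvA_outer_none (studentNums : List Int) (groups : List (List Int)) :
    ∀ (n x : Nat) (arr : List Int), x + n = studentNums.length →
    ((studentNums.drop x ≠ [] ∧ ¬ pvSizesOK groups) ∨ ∃ s ∈ studentNums.drop x, ¬ pvOk groups s) →
    pvA_outer studentNums groups x n arr = none := by
  intro n
  induction n with
  | zero =>
    intro x arr hxn h
    exfalso
    have hdn : studentNums.drop x = [] :=
      List.drop_eq_nil_of_le (show studentNums.length ≤ x by omega)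
    rcases h with ⟨hne, _⟩ | ⟨s, hsm, _⟩
    · exact hne hdn
    · exact absurd hsm (by simp [hdn])
  | succ n' ih =>
    intro x arr hxn h
    have hxlt : x < studentNums.length := by omega
    have hdrop : studentNums.drop x = studentNums[x] :: studentNums.drop (x + 1) :=
      List.drop_eq_getElem_cons hxlt
    have hget : PySem.List.pyGetD studentNums (x : Int) 0 = studentNums[x] := by
      simp [PySem.List.pyGetD_natCast, List.getD_eq_getElem?_getD, List.getElem?_eq_getElem hxlt]
    rw [pvA_outer, hget]
    rcases h with ⟨_, h⟩ | ⟨s, hsm, hns⟩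
    · rw [pvA_groupLoop_none _ _ _ _ (Or.inl h)]
    · rw [hdrop] at hsm
      rcases List.mem_cons.mp hsm with rfl | hsm'
      · rw [pvA_groupLoop_none _ _ _ _ (Or.inr hns)]
      · by_cases hok : pvOk groups studentNums[x]
        · by_cases hsz : pvSizesOK groups
          · obtain ⟨arr', harr⟩ := pvA_groupLoop_isSome studentNums[x] groups (arr ++ [0]) x hsz hok
            rw [harr]
            show pvA_outer studentNums groups (x + 1) n' arr' = none
            exact ih (x + 1) _ (by omega) (Or.inr ⟨s, hsm', hns⟩)
          · rw [pvA_groupLoop_none _ _ _ _ (Or.inl hsz)]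
        · rw [pvA_groupLoop_none _ _ _ _ (Or.inr hok)]

theorem pvA_final_eq (l : List Int) : pvA_final l = l.all (fun s => !(s == 0 || decide (s > 1))) := by
  induction l with
  | nil => rfl
  | cons s rest ih =>
    rw [pvA_final, List.all_cons, ← ih]
    by_cases h : s = 0 ∨ s > 1
    · rw [if_pos h]
      rcases h with h | h <;> simp [h]
    · rw [if_neg h]
      push_neg at h
      have h1 : (s == 0) = false := by simpa using h.1
      have h2 : decide (s > 1) = false := by simpa using (by omega : ¬ s > 1)
      simp [h1, h2]

-- A's characterisation
theorem pvA_char (studentNums : List Int) (groups : List (List Int)) (hne : studentNums ≠ []) :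
    are_valid_groups studentNums groups = true ↔
      (pvSizesOK groups ∧ ∀ s ∈ studentNums, pvOk groups s ∧ pvCnt groups s = 1) := by
  by_cases h : pvSizesOK groups ∧ ∀ s ∈ studentNums, pvOk groups s
  · rw [are_valid_groups,
      pvA_outer_some studentNums groups h.1 studentNums.length 0 [] (by omega) rfl
        (by simpa using h.2)]
    simp only [List.drop_zero, List.nil_append]
    rw [pvA_final_eq, List.all_map, List.all_eq_true]
    constructor
    · intro hall
      refine ⟨h.1, fun s hsm => ⟨h.2 s hsm, ?_⟩⟩
      have hc : (0:Int) ≤ pvCnt groups s := by simp [pvCnt]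
      have hx := hall s hsm
      simp only [Function.comp_apply, Bool.not_eq_eq_eq_not, Bool.not_true, Bool.or_eq_false_iff,
        beq_eq_false_iff_ne, ne_eq, decide_eq_false_iff_not, not_lt] at hx
      omega
    · rintro ⟨_, hall⟩ s hsm
      have h1 := (hall s hsm).2
      simp [h1]
  · rw [are_valid_groups,
      pvA_outer_none studentNums groups studentNums.length 0 [] (by omega)
        (by by_cases hs : pvSizesOK groups
            · right
              have hno : ¬ ∀ s ∈ studentNums, pvOk groups s := fun hall => h ⟨hs, hall⟩
              push_neg at hno
              obtain ⟨s, hsm, hns⟩ := hno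
              exact ⟨s, by simpa using hsm, hns⟩
            · exact Or.inl ⟨by simpa using hne, hs⟩)]
    simp only [Bool.false_eq_true, false_iff]
    rintro ⟨h1, h2⟩
    exact h ⟨h1, fun s hsm => (h2 s hsm).1⟩

-- ---- B side ----

-- effect of the fold over counter-items on the 'once' dict, for one group g
theorem pvB_items_once (g : List Int) (once : PySem.Dict Int Int) (dup : PySem.Set Int) (s : Int) :
    (((((g.foldl (fun d v => d.insert v (d.getD v 0 + 1)) PySem.Dict.empty : PySem.Dict Int Int)).items).foldl
        (fun (p : PySem.Dict Int Int × PySem.Set Int) kv =>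
          if kv.2 = 1 then (p.1.insert kv.1 (p.1.getD kv.1 0 + 1), p.2)
          else (p.1, PySem.Set.add p.2 kv.1))
        (once, dup)).1).getD s 0 =
      once.getD s 0 + (if g.count s = 1 then 1 else 0) := by
  simp only [PySem.Dict.foldl_insert_getD_add_one_eq_counter, PySem.Dict.items_counter]
  have hnd : (PySem.Set.ofList g).Nodup := PySem.Set.nodup_ofList g
  suffices h : ∀ (ks : List Int), ks.Nodup → ∀ once dup,
      (((ks.map (fun k => (k, (g.count k : Int)))).foldl
        (fun (p : PySem.Dict Int Int × PySem.Set Int) kv =>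
          if kv.2 = 1 then (p.1.insert kv.1 (p.1.getD kv.1 0 + 1), p.2)
          else (p.1, PySem.Set.add p.2 kv.1))
        (once, dup)).1).getD s 0 =
      once.getD s 0 + (if s ∈ ks ∧ g.count s = 1 then 1 else 0) by
    rw [h (PySem.Set.ofList g) hnd once dup]
    congr 1
    by_cases h1 : g.count s = 1
    · have : s ∈ g := List.count_pos_iff.mp (by omega)
      simp [h1, (PySem.Set.mem_ofList g s).mpr this]
    · simp [h1]
  intro ks
  induction ks with
  | nil => intro _ once dup; simp
  | cons k rest ih =>
    intro hnd once dup
    simp only [List.map_cons, List.foldl_cons]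
    by_cases h1 : (g.count k : Int) = 1
    · rw [if_pos h1, ih hnd.of_cons]
      by_cases hks : s = k
      · subst hks
        have hs1 : g.count s = 1 := by exact_mod_cast h1
        have : s ∉ rest := (List.nodup_cons.mp hnd).1
        simp [PySem.Dict.getD_insert_self, hs1, this]
      · rw [PySem.Dict.getD_insert_of_ne once (once.getD k 0 + 1) 0 (fun h => hks h)]
        congr 1
        by_cases hm : s ∈ rest ∧ g.count s = 1
        · simp [hm, List.mem_cons, hm.1]
        · simp only [List.mem_cons]
          rw [if_neg hm, if_neg (by tauto)]
    · rw [if_neg h1, ih hnd.of_cons]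
      congr 1
      have hks : ¬ (s = k ∧ g.count s = 1) := by
        rintro ⟨rfl, hc⟩; exact h1 (by exact_mod_cast hc)
      simp only [List.mem_cons]
      by_cases hm : s ∈ rest ∧ g.count s = 1
      · simp [hm, hm.1]
      · rw [if_neg hm, if_neg (by tauto)]

-- effect on the 'dup' set
theorem pvB_items_dup (g : List Int) (once : PySem.Dict Int Int) (dup : PySem.Set Int) (s : Int) :
    (s ∈ ((((g.foldl (fun d v => d.insert v (d.getD v 0 + 1)) PySem.Dict.empty : PySem.Dict Int Int)).items).foldl
        (fun (p : PySem.Dict Int Int × PySem.Set Int) kv =>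
          if kv.2 = 1 then (p.1.insert kv.1 (p.1.getD kv.1 0 + 1), p.2)
          else (p.1, PySem.Set.add p.2 kv.1))
        (once, dup)).2) ↔
      s ∈ dup ∨ g.count s > 1 := by
  simp only [PySem.Dict.foldl_insert_getD_add_one_eq_counter, PySem.Dict.items_counter]
  suffices h : ∀ (ks : List Int), ∀ once dup,
      (s ∈ ((ks.map (fun k => (k, (g.count k : Int)))).foldl
        (fun (p : PySem.Dict Int Int × PySem.Set Int) kv =>
          if kv.2 = 1 then (p.1.insert kv.1 (p.1.getD kv.1 0 + 1), p.2)
          else (p.1, PySem.Set.add p.2 kv.1))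
        (once, dup)).2) ↔
      s ∈ dup ∨ (s ∈ ks ∧ g.count s ≠ 1) by
    rw [h (PySem.Set.ofList g) once dup, PySem.Set.mem_ofList]
    constructor
    · rintro (h | ⟨hm, hne⟩)
      · exact Or.inl h
      · right; have := List.count_pos_iff.mpr hm; omega
    · rintro (h | h)
      · exact Or.inl h
      · right; exact ⟨List.count_pos_iff.mp (by omega), by omega⟩
  intro ks
  induction ks with
  | nil => intro once dup; simp
  | cons k rest ih =>
    intro once dup
    simp only [List.map_cons, List.foldl_cons]
    by_cases h1 : (g.count k : Int) = 1
    · rw [if_pos h1, ih]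
      constructor
      · rintro (h | h)
        · exact Or.inl h
        · exact Or.inr ⟨List.mem_cons_of_mem _ h.1, h.2⟩
      · rintro (h | ⟨hm, hne⟩)
        · exact Or.inl h
        · rcases List.mem_cons.mp hm with rfl | hm'
          · exact absurd h1 (by simpa using hne)
          · exact Or.inr ⟨hm', hne⟩
    · rw [if_neg h1, ih]
      rw [PySem.Set.mem_add]
      constructor
      · rintro ((h | rfl) | h)
        · exact Or.inl h
        · exact Or.inr ⟨List.mem_cons_self .., by simpa using h1⟩
        · exact Or.inr ⟨List.mem_cons_of_mem _ h.1, h.2⟩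
      · rintro (h | ⟨hm, hne⟩)
        · exact Or.inl (Or.inl h)
        · rcases List.mem_cons.mp hm with rfl | hm'
          · exact Or.inl (Or.inr rfl)
          · exact Or.inr ⟨hm', hne⟩

theorem pvB_scan_none (groups : List (List Int)) :
    ∀ once dup, ¬ pvSizesOK groups → pvB_scan groups once dup = none := by
  induction groups with
  | nil => intro once dup h; exact absurd (by simp [pvSizesOK]) h
  | cons g rest ih =>
    intro once dup h
    rw [pvB_scan]
    by_cases hsz : 2 ≤ g.length ∧ g.length ≤ 3
    · rw [if_neg (by simpa using hsz)]
      refine ih _ _ (fun hr => h ?_)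
      intro g' hg'
      rcases List.mem_cons.mp hg' with rfl | hg'
      · exact hsz
      · exact hr g' hg'
    · rw [if_pos (by simpa using hsz)]

theorem pvB_scan_some (groups : List (List Int)) :
    ∀ once dup, pvSizesOK groups →
    ∃ once' dup', pvB_scan groups once dup = some (once', dup') ∧
      (∀ s, once'.getD s 0 = once.getD s 0 + pvCnt groups s) ∧
      (∀ s, s ∈ dup' ↔ s ∈ dup ∨ ¬ pvOk groups s) := by
  induction groups with
  | nil =>
    intro once dup _
    exact ⟨once, dup, rfl, fun s => by simp [pvCnt], fun s => by simp [pvOk]⟩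
  | cons g rest ih =>
    intro once dup h
    have hsz := h g (List.mem_cons_self ..)
    have hr : pvSizesOK rest := fun g' hg' => h g' (List.mem_cons_of_mem _ hg')
    rw [pvB_scan, if_neg (by simpa using hsz)]
    obtain ⟨once', dup', heq, honce, hdup⟩ := ih _ _ hr
    refine ⟨once', dup', heq, fun s => ?_, fun s => ?_⟩
    · rw [honce s, pvB_items_once, pvCnt_cons]; ring
    · rw [hdup s, pvB_items_dup]
      constructor
      · rintro ((h' | h') | h')
        · exact Or.inl h'
        · exact Or.inr (fun hok => by have := hok g (List.mem_cons_self ..); omega)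
        · exact Or.inr (fun hok => h' (fun g' hg' => hok g' (List.mem_cons_of_mem _ hg')))
      · rintro (h' | h')
        · exact Or.inl (Or.inl h')
        · by_cases hg : g.count s > 1
          · exact Or.inl (Or.inr hg)
          · right
            intro hok
            apply h'
            intro g' hg'
            rcases List.mem_cons.mp hg' with rfl | hm
            · omega
            · exact hok g' hm

-- B's characterisation
theorem pvB_char (studentNums : List Int) (groups : List (List Int)) (hne : studentNums ≠ []) :
    are_valid_groups_alt studentNums groups = true ↔
      (pvSizesOK groups ∧ ∀ s ∈ studentNums, pvOk groups s ∧ pvCnt groups s = 1) := by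
  rw [are_valid_groups_alt, if_neg (by simpa using hne)]
  by_cases hs : pvSizesOK groups
  · obtain ⟨once', dup', heq, honce, hdup⟩ :=
      pvB_scan_some groups PySem.Dict.empty PySem.Set.empty hs
    have ho : ∀ s, once'.getD s 0 = pvCnt groups s := fun s => by
      rw [honce s]; simp [PySem.Dict.empty, PySem.Dict.getD, PySem.Dict.get?]
    have hd : ∀ s, s ∈ dup' ↔ ¬ pvOk groups s := fun s => by
      rw [hdup s]
      simp [PySem.Set.empty]
    rw [heq, List.all_eq_true]
    constructor
    · intro hall
      refine ⟨hs, fun s hsm => ?_⟩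
      have hx := hall s hsm
      simp only [Bool.and_eq_true, Bool.not_eq_eq_eq_not, Bool.not_true, beq_iff_eq] at hx
      obtain ⟨hdc, h1⟩ := hx
      have hok : pvOk groups s := by
        by_contra hno
        have : PySem.Set.contains dup' s = true :=
          (PySem.Set.contains_iff dup' s).mpr ((hd s).mpr hno)
        rw [this] at hdc
        exact absurd hdc (by simp)
      exact ⟨hok, by rw [← ho s, h1]⟩
    · rintro ⟨_, hall⟩ s hsm
      obtain ⟨hok, h1⟩ := hall s hsm
      have hdm : s ∉ dup' := fun hm => (hd s).mp hm hok
      simp [ho s, h1]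
      exact hdm
  · rw [pvB_scan_none groups _ _ hs]
    simp only [Bool.false_eq_true, false_iff]
    rintro ⟨h1, _⟩
    exact hs h1

-- ===== VERDICT (by name: the statement is the Claim_ definition above) =====
theorem are_valid_groups_spec : Claim_equal_are_valid_groups := by
  intro studentNums groups _
  unfold Spec_are_valid_groups
  by_cases hne : studentNums = []
  · subst hne; rfl
  · have h := (pvA_char studentNums groups hne).trans (pvB_char studentNums groups hne).symm
    cases hA : are_valid_groups studentNums groups
    · cases hB : are_valid_groups_alt studentNums groups
      · rfl
      · exact absurd (h.mpr hB) (by rw [hA]; exact Bool.false_ne_true)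
    · exact (h.mp hA).symm
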